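-- pv_equiv track=rewrite | github.com/GLA-Python/surprise-test-ishajainn | expanding.py | expanding
-- ===== SOURCE A (Python) =====
-- def expanding(lst):
--     lst1=[]
--     for i in range(len(lst)-1):
--         a=lst[i+1]-lst[i]
--         lst1.append(a)
--     c=0
--     for i in range(len(lst1)-1):
--         if lst1[i+1]>lst1[i]:
--             c=c+1
--     if c==len(lst1)-1:
--         return True
--     else:
--         return False
-- ===== SOURCE B (Python) =====
-- def expanding(lst):
--     if len(lst) < 2:
--         return False
--     a, b = lst[0], lst[1]
--     for c in lst[2:]:
--         if not (c - b > b - a):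
--             return False
--         a, b = b, c
--     return True
-- ===== Notes on version B (the rewrite author's own statement) =====
-- stated objective: simpler
-- what changed: B drops the intermediate differences list and the counter: it walks the original list once with a sliding pair (a,b), checking each adjacent-difference increase directly and returning False early, instead of building a diffs array and then counting increasing adjacent diff-pairs.
import Mathlib
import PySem

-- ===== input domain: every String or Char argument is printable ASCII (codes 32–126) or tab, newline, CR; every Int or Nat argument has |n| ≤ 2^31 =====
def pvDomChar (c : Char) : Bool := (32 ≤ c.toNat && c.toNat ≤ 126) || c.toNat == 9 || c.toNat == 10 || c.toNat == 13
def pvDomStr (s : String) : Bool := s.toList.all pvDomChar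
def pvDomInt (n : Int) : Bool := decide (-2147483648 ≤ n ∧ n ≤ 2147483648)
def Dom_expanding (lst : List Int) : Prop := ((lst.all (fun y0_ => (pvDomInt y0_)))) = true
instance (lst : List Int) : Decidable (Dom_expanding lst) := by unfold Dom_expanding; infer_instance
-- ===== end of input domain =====

-- B is a single sliding-pair pass over the original list with early exit, instead of
-- A's build-a-differences-list-then-count-increases two-phase scan (objective: simpler).

-- ===== PORT A =====
-- literal transliteration of A: build lst1 of consecutive differences, count adjacent
-- increases c, return c == len(lst1)-1
def expanding (lst : List Int) : Bool :=
  let lst1 : List Int :=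
    (PySem.List.pyRange 0 ((lst.length : Int) - 1) 1).foldl
      (fun acc i => acc ++ [PySem.List.pyGetD lst (i + 1) 0 - PySem.List.pyGetD lst i 0]) []
  let c : Int :=
    (PySem.List.pyRange 0 ((lst1.length : Int) - 1) 1).foldl
      (fun c i => if PySem.List.pyGetD lst1 (i + 1) 0 > PySem.List.pyGetD lst1 i 0 then c + 1 else c) 0
  if c = (lst1.length : Int) - 1 then true else false

-- ===== PORT B =====
-- the 'for c in lst[2:]' loop of Source B, carrying the sliding pair (a, b); early 'return False'
def expandingAltGo (a b : Int) : List Int → Bool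
  | [] => true
  | c :: rest => if c - b > b - a then expandingAltGo b c rest else false

def expanding_alt (lst : List Int) : Bool :=
  match lst with
  | [] => false
  | [_] => false
  | a :: b :: rest => expandingAltGo a b rest

-- ===== PRECONDITION & SPEC =====
def Spec_expanding (lst : List Int) (out : Bool) : Prop := out = expanding_alt lst
instance (lst : List Int) (out : Bool) : Decidable (Spec_expanding lst out) := by unfold Spec_expanding; infer_instance

-- ===== CLAIM (what is proved, stated in full; the proofs are below) =====
def Claim_equal_expanding : Prop := ∀ (lst : List Int), Dom_expanding lst → Spec_expanding lst (expanding lst)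

-- ===== LEMMAS AND PROOFS =====

-- proof-side helper: the list of consecutive differences, structurally
def pvDiffs : List Int → List Int
  | [] => []
  | [_] => []
  | a :: b :: r => (b - a) :: pvDiffs (b :: r)

theorem pvDiffs_eq_zipWith (lst : List Int) :
    pvDiffs lst = List.zipWith (fun x y => y - x) lst lst.tail := by
  induction lst with
  | nil => rfl
  | cons a r ih =>
    cases r with
    | nil => rfl
    | cons b r' => simp [pvDiffs, ih]

theorem pvDiffs_length (lst : List Int) : (pvDiffs lst).length = lst.length - 1 := by
  rw [pvDiffs_eq_zipWith]; cases lst <;> simp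

theorem pvDiffs_getElem (lst : List Int) (k : Nat) (h : k < (pvDiffs lst).length) :
    (pvDiffs lst)[k] =
      lst[k + 1]'(by rw [pvDiffs_length] at h; omega) - lst[k]'(by rw [pvDiffs_length] at h; omega) := by
  have h' := h
  rw [pvDiffs_length] at h'
  simp only [pvDiffs_eq_zipWith] at h ⊢
  rw [List.getElem_zipWith]
  congr 1
  rw [List.getElem_tail]

-- A's first loop builds exactly pvDiffs lst
theorem expanding_lst1_eq (lst : List Int) :
    (PySem.List.pyRange 0 ((lst.length : Int) - 1) 1).foldl
      (fun acc i => acc ++ [PySem.List.pyGetD lst (i + 1) 0 - PySem.List.pyGetD lst i 0]) []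
      = pvDiffs lst := by
  rw [PySem.List.foldl_append_singleton_eq_map]
  apply List.ext_getElem
  · simp [PySem.List.length_pyRange_one, pvDiffs_length]
  · intro k h1 h2
    simp only [List.nil_append] at h1 ⊢
    have hk : (k : Int) < (lst.length : Int) - 1 := by
      simp [PySem.List.length_pyRange_one] at h1; omega
    rw [List.getElem_map, PySem.List.getElem_pyRange_one, pvDiffs_getElem]
    have hb1 : (0 : Int) ≤ 0 + (k : Int) + 1 := by omega
    have hb2 : 0 + (k : Int) + 1 < (lst.length : Int) := by omega
    have hb3 : (0 : Int) ≤ 0 + (k : Int) := by omega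
    have hb4 : 0 + (k : Int) < (lst.length : Int) := by omega
    rw [PySem.List.pyGetD_eq_getElem lst (i := 0 + (k:Int) + 1) 0 hb1 hb2, PySem.List.pyGetD_eq_getElem lst (i := 0 + (k:Int)) 0 hb3 hb4]
    congr 1 <;> congr 1 <;> omega

-- the counting loop over any list ys, as countP of the index range
theorem expanding_count_eq (ys : List Int) :
    (PySem.List.pyRange 0 ((ys.length : Int) - 1) 1).foldl
      (fun c i => if PySem.List.pyGetD ys (i + 1) 0 > PySem.List.pyGetD ys i 0 then c + 1 else c) (0 : Int)
      = ((PySem.List.pyRange 0 ((ys.length : Int) - 1) 1).countP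
          (fun i => decide (PySem.List.pyGetD ys i 0 < PySem.List.pyGetD ys (i + 1) 0)) : Int) := by
  rw [show (fun (c : Int) i => if PySem.List.pyGetD ys (i + 1) 0 > PySem.List.pyGetD ys i 0 then c + 1 else c)
        = (fun (c : Int) i => if (fun i => decide (PySem.List.pyGetD ys i 0 < PySem.List.pyGetD ys (i + 1) 0)) i = true then c + 1 else c)
      from by funext c i; simp [gt_iff_lt]]
  rw [PySem.List.foldl_count_if]
  simp

-- the count equals len-1 exactly when every adjacent pair of ys increases
theorem expanding_count_full_iff (ys : List Int) (hnil : ys ≠ []) :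
    (((PySem.List.pyRange 0 ((ys.length : Int) - 1) 1).countP
        (fun i => decide (PySem.List.pyGetD ys i 0 < PySem.List.pyGetD ys (i + 1) 0)) : Int)
      = (ys.length : Int) - 1)
    ↔ List.IsChain (· < ·) ys := by
  have hpos : 1 ≤ ys.length := by have := List.length_pos_of_ne_nil hnil; omega
  have hlen : (PySem.List.pyRange 0 ((ys.length : Int) - 1) 1).length = ys.length - 1 := by
    rw [PySem.List.length_pyRange_one]; omega
  have hle := List.countP_le_length
    (p := fun i => decide (PySem.List.pyGetD ys i 0 < PySem.List.pyGetD ys (i + 1) 0))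
    (l := PySem.List.pyRange 0 ((ys.length : Int) - 1) 1)
  rw [show (((PySem.List.pyRange 0 ((ys.length : Int) - 1) 1).countP
        (fun i => decide (PySem.List.pyGetD ys i 0 < PySem.List.pyGetD ys (i + 1) 0)) : Int)
      = (ys.length : Int) - 1)
      ↔ ((PySem.List.pyRange 0 ((ys.length : Int) - 1) 1).countP
        (fun i => decide (PySem.List.pyGetD ys i 0 < PySem.List.pyGetD ys (i + 1) 0))
      = (PySem.List.pyRange 0 ((ys.length : Int) - 1) 1).length) from by omega]
  rw [List.countP_eq_length, List.isChain_iff_getElem]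
  constructor
  · intro h k hk
    have hmem : (k : Int) ∈ PySem.List.pyRange 0 ((ys.length : Int) - 1) 1 := by
      rw [PySem.List.mem_pyRange_one]; omega
    have := h _ hmem
    simp only [decide_eq_true_eq] at this
    rw [PySem.List.pyGetD_eq_getElem ys (i := (k:Int)) 0 (by omega) (by omega),
         PySem.List.pyGetD_eq_getElem ys (i := (k:Int) + 1) 0 (by omega) (by omega)] at this
    simpa using this
  · intro h i hmem
    rw [PySem.List.mem_pyRange_one] at hmem
    simp only [decide_eq_true_eq]
    rw [PySem.List.pyGetD_eq_getElem ys (i := i) 0 (by omega) (by omega),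
        PySem.List.pyGetD_eq_getElem ys (i := i + 1) 0 (by omega) (by omega)]
    have hh := h i.toNat (by omega)
    convert hh using 2
    omega

-- A = true iff the differences list is nonempty and strictly increasing
theorem expanding_eq_true_iff (lst : List Int) :
    expanding lst = true ↔ pvDiffs lst ≠ [] ∧ List.IsChain (· < ·) (pvDiffs lst) := by
  unfold expanding
  simp only [expanding_lst1_eq, expanding_count_eq]
  by_cases hnil : pvDiffs lst = []
  · rw [hnil]
    rw [show PySem.List.pyRange 0 ((([] : List Int).length : Int) - 1) 1 = [] from
      PySem.List.pyRange_one_eq_nil (by simp)]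
    simp
  · split_ifs with hc
    · simp only [true_iff]
      exact ⟨hnil, (expanding_count_full_iff _ hnil).mp hc⟩
    · simp only [false_iff, not_and]
      intro _ hch
      exact hc ((expanding_count_full_iff _ hnil).mpr hch)

-- B-side characterisation
theorem expandingAltGo_iff (a b : Int) (r : List Int) :
    expandingAltGo a b r = true ↔ List.IsChain (· < ·) ((b - a) :: pvDiffs (b :: r)) := by
  induction r generalizing a b with
  | nil => simp [expandingAltGo, pvDiffs]
  | cons c r' ih =>
    simp only [expandingAltGo, pvDiffs]
    rw [List.isChain_cons_cons]
    split_ifs with h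
    · rw [ih]
      constructor
      · intro hc; exact ⟨by omega, hc⟩
      · intro hc; exact hc.2
    · constructor
      · intro hh; simp at hh
      · intro hc; exact absurd hc.1 (by omega)

theorem expanding_alt_eq_true_iff (lst : List Int) :
    expanding_alt lst = true ↔ pvDiffs lst ≠ [] ∧ List.IsChain (· < ·) (pvDiffs lst) := by
  match lst with
  | [] => simp [expanding_alt, pvDiffs]
  | [x] => simp [expanding_alt, pvDiffs]
  | a :: b :: r =>
    simp only [expanding_alt, expandingAltGo_iff, pvDiffs]
    constructor
    · intro h; exact ⟨by simp, h⟩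
    · intro h; exact h.2

-- ===== VERDICT (by name: the statement is the Claim_ definition above) =====
theorem expanding_spec : Claim_equal_expanding := by
  intro lst _
  unfold Spec_expanding
  have ha := expanding_eq_true_iff lst
  have hb := expanding_alt_eq_true_iff lst
  cases hA : expanding lst <;> cases hB : expanding_alt lst <;> simp_all
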